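-- pv_equiv track=rewrite | github.com/prasadbobby/cuddly-carnival | backend/agents/learning_content_generator.py | _extract_main_subject_from_topic
-- ===== SOURCE A (Python) =====
-- def _extract_main_subject_from_topic(topic: str) -> str:
--     """Extract the main subject from any topic"""
--
--     topic_lower = topic.lower()
--
--     # Programming languages
--     if any(term in topic_lower for term in ['java', 'python', 'javascript', 'c++', 'c#', 'php', 'ruby', 'swift']):
--         if 'java' in topic_lower:
--             return 'Java Programming'
--         elif 'python' in topic_lower:
--             return 'Python Programming'
--         elif 'javascript' in topic_lower:
--             return 'JavaScript Programming'
--         else: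
--             return 'Programming'
--
--     # Creative subjects
--     elif any(term in topic_lower for term in ['photography', 'photo']):
--         return 'Photography'
--     elif any(term in topic_lower for term in ['art', 'painting', 'drawing', 'design']):
--         return 'Visual Arts'
--     elif any(term in topic_lower for term in ['music', 'guitar', 'piano', 'singing']):
--         return 'Music'
--
--     # Practical subjects
--     elif any(term in topic_lower for term in ['cooking', 'culinary', 'baking', 'chef', 'recipe']):
--         return 'Culinary Arts'
--     elif any(term in topic_lower for term in ['fitness', 'exercise', 'workout', 'gym']):
--         return 'Fitness and Health'
--     elif any(term in topic_lower for term in ['gardening', 'plants', 'garden']):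
--         return 'Gardening'
--
--     # Business subjects
--     elif any(term in topic_lower for term in ['business', 'marketing', 'sales', 'finance', 'management']):
--         return 'Business'
--     elif any(term in topic_lower for term in ['economics', 'economy']):
--         return 'Economics'
--
--     # Academic subjects
--     elif any(term in topic_lower for term in ['physics']):
--         return 'Physics'
--     elif any(term in topic_lower for term in ['chemistry']):
--         return 'Chemistry'
--     elif any(term in topic_lower for term in ['biology']):
--         return 'Biology'
--     elif any(term in topic_lower for term in ['history']):
--         return 'History'
--     elif any(term in topic_lower for term in ['psychology']):
--         return 'Psychology'
--     elif any(term in topic_lower for term in ['literature', 'writing', 'english']):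
--         return 'Literature and Writing'
--
--     # Language learning
--     elif any(term in topic_lower for term in ['spanish', 'french', 'german', 'chinese', 'language']):
--         return 'Language Learning'
--
--     # Technology
--     elif any(term in topic_lower for term in ['computer', 'technology', 'software', 'hardware']):
--         return 'Technology'
--
--     # If topic contains "in [subject]", extract the subject
--     if ' in ' in topic:
--         return topic.split(' in ')[-1].title()
--
--     # Default: return the topic itself as the subject
--     return topic.title()
-- ===== SOURCE B (Python) =====
-- _CATEGORIES = [
--     (['java'], 'Java Programming'),
--     (['python'], 'Python Programming'),
--     (['javascript'], 'JavaScript Programming'),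
--     (['c++', 'c#', 'php', 'ruby', 'swift'], 'Programming'),
--     (['photography', 'photo'], 'Photography'),
--     (['art', 'painting', 'drawing', 'design'], 'Visual Arts'),
--     (['music', 'guitar', 'piano', 'singing'], 'Music'),
--     (['cooking', 'culinary', 'baking', 'chef', 'recipe'], 'Culinary Arts'),
--     (['fitness', 'exercise', 'workout', 'gym'], 'Fitness and Health'),
--     (['gardening', 'plants', 'garden'], 'Gardening'),
--     (['business', 'marketing', 'sales', 'finance', 'management'], 'Business'),
--     (['economics', 'economy'], 'Economics'),
--     (['physics'], 'Physics'),
--     (['chemistry'], 'Chemistry'),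
--     (['biology'], 'Biology'),
--     (['history'], 'History'),
--     (['psychology'], 'Psychology'),
--     (['literature', 'writing', 'english'], 'Literature and Writing'),
--     (['spanish', 'french', 'german', 'chinese', 'language'], 'Language Learning'),
--     (['computer', 'technology', 'software', 'hardware'], 'Technology'),
-- ]
--
-- # flat priority map: keyword -> (rank, label); lower rank = higher priority
-- _PRIORITY = {kw: (i, label)
--              for i, (kw, label) in enumerate(
--                  (kw, label) for kws, label in _CATEGORIES for kw in kws)}
--
--
-- def _extract_main_subject_from_topic(topic: str) -> str:
--     tl = topic.lower()
--     matches = [v for kw, v in _PRIORITY.items() if kw in tl]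
--     if matches:
--         return min(matches, key=lambda v: v[0])[1]
--     if ' in ' in topic:
--         return topic.split(' in ')[-1].title()
--     return topic.title()
-- ===== Notes on version B (the rewrite author's own statement) =====
-- stated objective: alternative
-- what changed: Instead of a short-circuiting if/elif cascade, B builds a flat keyword->(rank,label) priority dict, collects ALL keywords matching the lowered topic in one comprehension, and resolves the category by taking the minimum-rank match (javascript entries outrank nothing: 'java' has rank 0, so 'javascript' inputs still yield 'Java Programming'); fallback unchanged.
import Mathlib
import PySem

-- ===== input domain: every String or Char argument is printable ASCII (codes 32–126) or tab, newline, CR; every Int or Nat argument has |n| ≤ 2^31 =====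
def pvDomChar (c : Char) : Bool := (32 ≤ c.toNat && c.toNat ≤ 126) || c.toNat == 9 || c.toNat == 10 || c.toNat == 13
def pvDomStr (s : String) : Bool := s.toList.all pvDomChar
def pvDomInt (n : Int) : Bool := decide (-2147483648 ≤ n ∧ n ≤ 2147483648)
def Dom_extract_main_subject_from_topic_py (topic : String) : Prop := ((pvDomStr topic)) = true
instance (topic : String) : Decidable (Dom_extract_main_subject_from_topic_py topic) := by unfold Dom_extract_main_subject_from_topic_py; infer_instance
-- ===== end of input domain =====

-- B resolves the category by taking the minimum-rank entry among ALL matching keywords of a flat keyword->(rank,label) map, instead of A's short-circuiting if/elif cascade; same results.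


-- ===== PORT A =====
-- shared primitive: Python str.title() (exact on ASCII: a cased letter starts a word iff the previous char is not a letter)
def pyTitleChars : List Char → Bool → List Char
  | [], _ => []
  | c :: cs, prevAlpha =>
    (if PySem.Chars.isalpha c then (if prevAlpha then PySem.Chars.lowerChar c else PySem.Chars.upperChar c) else c)
      :: pyTitleChars cs (PySem.Chars.isalpha c)

def pyTitle (s : String) : String := String.ofList (pyTitleChars s.toList false)

def extract_main_subject_from_topic_py (topic : String) : String :=
  let tl := PySem.Str.lower topic
  if ["java", "python", "javascript", "c++", "c#", "php", "ruby", "swift"].any (fun t => PySem.Str.isIn t tl) then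
    if PySem.Str.isIn "java" tl then "Java Programming"
    else if PySem.Str.isIn "python" tl then "Python Programming"
    else if PySem.Str.isIn "javascript" tl then "JavaScript Programming"
    else "Programming"
  else if ["photography", "photo"].any (fun t => PySem.Str.isIn t tl) then "Photography"
  else if ["art", "painting", "drawing", "design"].any (fun t => PySem.Str.isIn t tl) then "Visual Arts"
  else if ["music", "guitar", "piano", "singing"].any (fun t => PySem.Str.isIn t tl) then "Music"
  else if ["cooking", "culinary", "baking", "chef", "recipe"].any (fun t => PySem.Str.isIn t tl) then "Culinary Arts"
  else if ["fitness", "exercise", "workout", "gym"].any (fun t => PySem.Str.isIn t tl) then "Fitness and Health"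
  else if ["gardening", "plants", "garden"].any (fun t => PySem.Str.isIn t tl) then "Gardening"
  else if ["business", "marketing", "sales", "finance", "management"].any (fun t => PySem.Str.isIn t tl) then "Business"
  else if ["economics", "economy"].any (fun t => PySem.Str.isIn t tl) then "Economics"
  else if ["physics"].any (fun t => PySem.Str.isIn t tl) then "Physics"
  else if ["chemistry"].any (fun t => PySem.Str.isIn t tl) then "Chemistry"
  else if ["biology"].any (fun t => PySem.Str.isIn t tl) then "Biology"
  else if ["history"].any (fun t => PySem.Str.isIn t tl) then "History"
  else if ["psychology"].any (fun t => PySem.Str.isIn t tl) then "Psychology"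
  else if ["literature", "writing", "english"].any (fun t => PySem.Str.isIn t tl) then "Literature and Writing"
  else if ["spanish", "french", "german", "chinese", "language"].any (fun t => PySem.Str.isIn t tl) then "Language Learning"
  else if ["computer", "technology", "software", "hardware"].any (fun t => PySem.Str.isIn t tl) then "Technology"
  else if PySem.Str.isIn " in " topic then pyTitle (((PySem.Str.split? topic " in ").getD []).getLastD "")
  else pyTitle topic

-- ===== PORT B =====
-- the flat priority dict _PRIORITY of Source B, as its (keyword, rank, label) items in insertion order
def pvPriority : List (String × Nat × String) :=
  [
    ("java", 0, "Java Programming"),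
    ("python", 1, "Python Programming"),
    ("javascript", 2, "JavaScript Programming"),
    ("c++", 3, "Programming"),
    ("c#", 4, "Programming"),
    ("php", 5, "Programming"),
    ("ruby", 6, "Programming"),
    ("swift", 7, "Programming"),
    ("photography", 8, "Photography"),
    ("photo", 9, "Photography"),
    ("art", 10, "Visual Arts"),
    ("painting", 11, "Visual Arts"),
    ("drawing", 12, "Visual Arts"),
    ("design", 13, "Visual Arts"),
    ("music", 14, "Music"),
    ("guitar", 15, "Music"),
    ("piano", 16, "Music"),
    ("singing", 17, "Music"),
    ("cooking", 18, "Culinary Arts"),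
    ("culinary", 19, "Culinary Arts"),
    ("baking", 20, "Culinary Arts"),
    ("chef", 21, "Culinary Arts"),
    ("recipe", 22, "Culinary Arts"),
    ("fitness", 23, "Fitness and Health"),
    ("exercise", 24, "Fitness and Health"),
    ("workout", 25, "Fitness and Health"),
    ("gym", 26, "Fitness and Health"),
    ("gardening", 27, "Gardening"),
    ("plants", 28, "Gardening"),
    ("garden", 29, "Gardening"),
    ("business", 30, "Business"),
    ("marketing", 31, "Business"),
    ("sales", 32, "Business"),
    ("finance", 33, "Business"),
    ("management", 34, "Business"),
    ("economics", 35, "Economics"),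
    ("economy", 36, "Economics"),
    ("physics", 37, "Physics"),
    ("chemistry", 38, "Chemistry"),
    ("biology", 39, "Biology"),
    ("history", 40, "History"),
    ("psychology", 41, "Psychology"),
    ("literature", 42, "Literature and Writing"),
    ("writing", 43, "Literature and Writing"),
    ("english", 44, "Literature and Writing"),
    ("spanish", 45, "Language Learning"),
    ("french", 46, "Language Learning"),
    ("german", 47, "Language Learning"),
    ("chinese", 48, "Language Learning"),
    ("language", 49, "Language Learning"),
    ("computer", 50, "Technology"),
    ("technology", 51, "Technology"),
    ("software", 52, "Technology"),
    ("hardware", 53, "Technology")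
  ]

def extract_main_subject_from_topic_py_alt (topic : String) : String :=
  let tl := PySem.Str.lower topic
  match PySem.List.min? ((pvPriority.filter (fun e => PySem.Str.isIn e.1 tl)).map (fun e => e.2)) (fun v => v.1) with
  | some v => v.2
  | none =>
    if PySem.Str.isIn " in " topic then pyTitle (((PySem.Str.split? topic " in ").getD []).getLastD "")
    else pyTitle topic

-- ===== PRECONDITION & SPEC =====
def Spec_extract_main_subject_from_topic_py (topic : String) (out : String) : Prop := out = extract_main_subject_from_topic_py_alt topic
instance (topic : String) (out : String) : Decidable (Spec_extract_main_subject_from_topic_py topic out) := by unfold Spec_extract_main_subject_from_topic_py; infer_instance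

-- ===== CLAIM =====
def Claim_equal_extract_main_subject_from_topic_py : Prop := ∀ (topic : String), Dom_extract_main_subject_from_topic_py topic → Spec_extract_main_subject_from_topic_py topic (extract_main_subject_from_topic_py topic)

-- ===== LEMMAS AND PROOFS =====
-- first-match scan over the flat table (proof device characterising B's min-of-matches)
def scanFlat : List (String × Nat × String) → String → String → String
  | [], _, fb => fb
  | (kw, _, label) :: rest, tl, fb => if PySem.Str.isIn kw tl then label else scanFlat rest tl fb

theorem min?_head_of_lt (x : Nat × String) (xs : List (Nat × String))
    (h : ∀ y ∈ xs, x.1 < y.1) :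
    PySem.List.min? (x :: xs) (fun v => v.1) = some x := by
  cases hm : PySem.List.min? (x :: xs) (fun v => v.1) with
  | none =>
    have := (PySem.List.min?_eq_none_iff (xs := x :: xs) (key := fun v => v.1)).mp hm
    simp at this
  | some m =>
    have hmem := PySem.List.min?_mem hm
    have hmin := PySem.List.min?_isMin hm x (List.mem_cons_self ..)
    rcases List.mem_cons.mp hmem with h1 | h2
    · rw [h1]
    · exact absurd hmin (by have := h m h2; omega)

theorem scanFlat_cons (kw : String) (r : Nat) (label : String) (rest : List (String × Nat × String)) (tl fb : String) :
    scanFlat ((kw, r, label) :: rest) tl fb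
      = if PySem.Str.isIn kw tl then label else scanFlat rest tl fb := rfl

theorem if_or_split (a b : Prop) [Decidable a] [Decidable b] (x r : String) :
    (if a ∨ b then x else r) = if a then x else if b then x else r := by
  by_cases ha : a <;> by_cases hb : b <;> simp [ha, hb]

theorem minFilter_eq_scan (l : List (String × Nat × String)) (tl fb : String)
    (hp : l.Pairwise (fun a b => a.2.1 < b.2.1)) :
    (match PySem.List.min? ((l.filter (fun e => PySem.Str.isIn e.1 tl)).map (fun e => e.2)) (fun v => v.1) with
     | some v => v.2
     | none => fb) = scanFlat l tl fb := by
  induction l with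
  | nil => rfl
  | cons e rest ih =>
    obtain ⟨kw, r, label⟩ := e
    have h1 := (List.pairwise_cons.mp hp).1
    have h2 := (List.pairwise_cons.mp hp).2
    by_cases hk : PySem.Str.isIn kw tl
    · have hlt : ∀ y ∈ (rest.filter (fun e => PySem.Str.isIn e.1 tl)).map (fun e => e.2),
          ((r, label) : Nat × String).1 < y.1 := by
        intro y hy
        rcases List.mem_map.mp hy with ⟨e', he', rfl⟩
        exact h1 e' (List.mem_of_mem_filter he')
      simp only [List.filter_cons, hk, if_pos, List.map_cons]
      rw [min?_head_of_lt _ _ hlt]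
      rw [scanFlat_cons, if_pos hk]
    · simp only [List.filter_cons]
      rw [if_neg (by simpa using hk)]
      rw [ih h2]
      rw [scanFlat_cons, if_neg hk]

-- ===== VERDICT =====
set_option maxHeartbeats 2000000 in
theorem extract_main_subject_from_topic_py_spec : Claim_equal_extract_main_subject_from_topic_py := by
  intro topic _
  unfold Spec_extract_main_subject_from_topic_py
  unfold extract_main_subject_from_topic_py extract_main_subject_from_topic_py_alt
  rw [minFilter_eq_scan pvPriority _ _ (by decide)]
  simp only [pvPriority, scanFlat_cons, scanFlat, List.any_cons, List.any_nil, Bool.or_false]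
  by_cases h1 : PySem.Chars.isIn ['j', 'a', 'v', 'a'] (PySem.Chars.lower topic.toList) = true
  · simp [h1]
  by_cases h2 : PySem.Chars.isIn ['p', 'y', 't', 'h', 'o', 'n'] (PySem.Chars.lower topic.toList) = true
  · simp [h1, h2]
  by_cases h3 : PySem.Chars.isIn ['j', 'a', 'v', 'a', 's', 'c', 'r', 'i', 'p', 't'] (PySem.Chars.lower topic.toList) = true
  · simp [h1, h2, h3]
  simp [h1, h2, h3, if_or_split]
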